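-- pv_equiv track=rewrite | github.com/KrithikK7/Audio_watermarking | Embed/v1.py | insert_sync_frames
-- ===== SOURCE A (Python) =====
-- from typing import List, Tuple
--
-- def u16_to_bits(val: int) -> List[int]:
--     return [ (val >> i) & 1 for i in range(15, -1, -1) ]
--
-- def insert_sync_frames(frames: List[List[int]], interval: int, sync_word: int) -> List[List[int]]:
--     if interval <= 0:
--         return frames[:]
--     out = []
--     cnt = 0
--     sync_bits = u16_to_bits(sync_word & 0xFFFF)
--     for fr in frames:
--         if cnt % interval == 0:
--             out.append(sync_bits)
--         out.append(fr)
--         cnt += 1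
--     out.append(sync_bits)  # trailing sync
--     return out
-- ===== SOURCE B (Python) =====
-- from typing import List
--
-- def u16_to_bits(val: int) -> List[int]:
--     return [(val >> (15 - i)) & 1 for i in range(16)]
--
-- def insert_sync_frames(frames: List[List[int]], interval: int, sync_word: int) -> List[List[int]]:
--     if interval <= 0:
--         return frames[:]
--     sync_bits = u16_to_bits(sync_word & 0xFFFF)
--     out = []
--     rest = frames
--     while rest:
--         out.append(sync_bits)
--         out.extend(rest[:interval])
--         rest = rest[interval:]
--     out.append(sync_bits)  # trailing sync
--     return out
-- ===== Notes on version B (the rewrite author's own statement) =====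
-- stated objective: simpler
-- what changed: B replaces A's per-frame loop with a modulo counter by a while loop that slices off one chunk of `interval` frames per step, emitting the sync before each chunk and once at the end; the counter and modulo test disappear.
import Mathlib
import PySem

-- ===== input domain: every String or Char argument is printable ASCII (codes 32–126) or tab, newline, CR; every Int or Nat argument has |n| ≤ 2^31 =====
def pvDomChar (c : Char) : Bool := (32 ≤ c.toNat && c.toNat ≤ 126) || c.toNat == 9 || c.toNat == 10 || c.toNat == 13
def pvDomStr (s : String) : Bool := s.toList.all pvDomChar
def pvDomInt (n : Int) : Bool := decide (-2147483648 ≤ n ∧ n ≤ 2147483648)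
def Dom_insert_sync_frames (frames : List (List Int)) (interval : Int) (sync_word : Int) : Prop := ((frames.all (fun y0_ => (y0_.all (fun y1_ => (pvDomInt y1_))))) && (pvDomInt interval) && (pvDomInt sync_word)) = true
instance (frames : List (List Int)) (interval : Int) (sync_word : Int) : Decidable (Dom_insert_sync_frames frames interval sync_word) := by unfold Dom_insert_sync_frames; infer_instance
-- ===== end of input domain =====

-- B replaces A's per-frame modulo counter by slicing off one chunk of `interval`
-- frames per step (objective: simpler decomposition, same cost); return value only
-- (list-object sharing of sync_bits is not modelled).

-- ===== PORT A =====
-- [ (val >> i) & 1 for i in range(15, -1, -1) ]; i is always 0..15 here so i.toNat is exact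
def u16_to_bits (val : Int) : List Int :=
  (PySem.List.pyRange 15 (-1) (-1)).map (fun i => PySem.Int.band (val >>> i.toNat) 1)

def insert_sync_frames (frames : List (List Int)) (interval : Int) (sync_word : Int) : List (List Int) :=
  if interval ≤ 0 then frames
  else
    let sync_bits := u16_to_bits (PySem.Int.band sync_word 0xFFFF)
    let st := frames.foldl
      (fun (s : List (List Int) × Int) fr =>
        ((if PySem.Int.mod s.2 interval = 0 then s.1 ++ [sync_bits] else s.1) ++ [fr], s.2 + 1))
      ([], 0)
    st.1 ++ [sync_bits]

-- ===== PORT B =====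
-- [ (val >> (15 - i)) & 1 for i in range(16) ]; 15 - i is always 0..15 so .toNat is exact
def u16_to_bits_alt (val : Int) : List Int :=
  (PySem.List.pyRange 0 16 1).map (fun i => PySem.Int.band (val >>> (15 - i).toNat) 1)

-- the `while rest:` loop; fuel = rest.length makes it total (never exhausted when interval ≥ 1)
def bLoop (sync_bits : List Int) (interval : Int) : Nat → List (List Int) → List (List Int)
  | _, [] => []
  | 0, _ => []
  | fuel+1, rest =>
      (sync_bits :: PySem.List.slice rest none (some interval))
        ++ bLoop sync_bits interval fuel (PySem.List.slice rest (some interval) none)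

def insert_sync_frames_alt (frames : List (List Int)) (interval : Int) (sync_word : Int) : List (List Int) :=
  if interval ≤ 0 then frames
  else
    let sync_bits := u16_to_bits_alt (PySem.Int.band sync_word 0xFFFF)
    bLoop sync_bits interval frames.length frames ++ [sync_bits]

-- ===== PRECONDITION & SPEC =====
def Spec_insert_sync_frames (frames : List (List Int)) (interval : Int) (sync_word : Int) (out : List (List Int)) : Prop := out = insert_sync_frames_alt frames interval sync_word
instance (frames : List (List Int)) (interval : Int) (sync_word : Int) (out : List (List Int)) : Decidable (Spec_insert_sync_frames frames interval sync_word out) := by unfold Spec_insert_sync_frames; infer_instance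

-- ===== CLAIM (what is proved, stated in full; the proofs are below) =====
def Claim_equal_insert_sync_frames : Prop := ∀ (frames : List (List Int)) (interval : Int) (sync_word : Int), Dom_insert_sync_frames frames interval sync_word → Spec_insert_sync_frames frames interval sync_word (insert_sync_frames frames interval sync_word)

-- ===== LEMMAS AND PROOFS =====

-- the two bit-extraction comprehensions produce the same list
theorem u16_eq (v : Int) : u16_to_bits v = u16_to_bits_alt v := by
  have h1 : PySem.List.pyRange 15 (-1) (-1)
      = [15, 14, 13, 12, 11, 10, 9, 8, 7, 6, 5, 4, 3, 2, 1, 0] := by decide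
  have h2 : PySem.List.pyRange 0 16 1
      = [0, 1, 2, 3, 4, 5, 6, 7, 8, 9, 10, 11, 12, 13, 14, 15] := by decide
  simp only [u16_to_bits, u16_to_bits_alt, h1, h2, List.map]
  norm_num

-- A's loop body, abstracted: sync list s, interval k, counter c
def fA (s : List Int) (k : Int) : Int → List (List Int) → List (List Int)
  | _, [] => []
  | c, x :: t => (if PySem.Int.mod c k = 0 then [s] else []) ++ x :: fA s k (c + 1) t

-- same with a Nat counter and Nat modulus
def fAN (s : List Int) (kn : Nat) : Nat → List (List Int) → List (List Int)
  | _, [] => []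
  | n, x :: t => (if n % kn = 0 then [s] else []) ++ x :: fAN s kn (n + 1) t

theorem foldA_eq (s : List Int) (k : Int) :
    ∀ (t : List (List Int)) (acc : List (List Int)) (c : Int),
      (t.foldl
        (fun (st : List (List Int) × Int) fr =>
          ((if PySem.Int.mod st.2 k = 0 then st.1 ++ [s] else st.1) ++ [fr], st.2 + 1))
        (acc, c)).1 = acc ++ fA s k c t := by
  intro t
  induction t with
  | nil => intro acc c; simp [fA]
  | cons x xs ih =>
      intro acc c
      simp only [List.foldl, fA, ih]
      split_ifs <;> simp

theorem fA_cast (s : List Int) (k : Int) (hk : 0 < k) :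
    ∀ (t : List (List Int)) (n : Nat), fA s k (n : Int) t = fAN s k.toNat n t := by
  intro t
  induction t with
  | nil => intro n; rfl
  | cons x xs ih =>
      intro n
      have hk' : ((k.toNat : Nat) : Int) = k := Int.toNat_of_nonneg hk.le
      have hmod : PySem.Int.mod (n : Int) k = 0 ↔ n % k.toNat = 0 := by
        rw [← hk', PySem.Int.mod_natCast]
        exact_mod_cast Iff.rfl
      have hsucc : ((n : Int) + 1) = ((n + 1 : Nat) : Int) := by push_cast; ring
      simp only [fA, fAN, hsucc, ih]
      by_cases h : n % k.toNat = 0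
      · rw [if_pos (hmod.mpr h), if_pos h]
      · rw [if_neg (fun hc => h (hmod.mp hc)), if_neg h]

theorem fAN_congr (s : List Int) (kn : Nat) :
    ∀ (t : List (List Int)) (n m : Nat), n % kn = m % kn → fAN s kn n t = fAN s kn m t := by
  intro t
  induction t with
  | nil => intro n m _; rfl
  | cons x xs ih =>
      intro n m h
      have h1 : (n + 1) % kn = (m + 1) % kn := by
        rw [Nat.add_mod n 1, Nat.add_mod m 1, h]
      simp only [fAN, h, ih _ _ h1]

theorem fAN_inner (s : List Int) (kn : Nat) :
    ∀ (d : Nat) (t : List (List Int)) (n : Nat), n + d = kn → 0 < n →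
      fAN s kn n t = t.take d ++ fAN s kn kn (t.drop d) := by
  intro d
  induction d with
  | zero => intro t n h _; subst h; simp
  | succ d ih =>
      intro t n h hn
      cases t with
      | nil => simp [fAN]
      | cons x xs =>
          have hlt : n < kn := by omega
          have hne : n % kn ≠ 0 := by rw [Nat.mod_eq_of_lt hlt]; omega
          simp only [fAN, if_neg hne, List.take_succ_cons, List.drop_succ_cons,
            List.nil_append, List.cons_append]
          exact congrArg (x :: ·) (ih xs (n + 1) (by omega) (by omega))

theorem fAN_eq_bLoop (s : List Int) (k : Int) (hk : 0 < k) :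
    ∀ (fuel : Nat) (t : List (List Int)), t.length ≤ fuel →
      fAN s k.toNat 0 t = bLoop s k fuel t := by
  intro fuel
  induction fuel with
  | zero =>
      intro t ht
      have : t = [] := List.eq_nil_of_length_eq_zero (by omega)
      subst this; rfl
  | succ fuel ih =>
      intro t ht
      cases t with
      | nil => rfl
      | cons x xs =>
          have hkn : 1 ≤ k.toNat := by omega
          have h1 : fAN s k.toNat 1 xs
              = xs.take (k.toNat - 1) ++ fAN s k.toNat k.toNat (xs.drop (k.toNat - 1)) :=
            fAN_inner s k.toNat (k.toNat - 1) xs 1 (by omega) (by omega)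
          have h0 : fAN s k.toNat k.toNat (xs.drop (k.toNat - 1))
              = fAN s k.toNat 0 (xs.drop (k.toNat - 1)) :=
            fAN_congr s k.toNat _ k.toNat 0 (by simp)
          have hih : fAN s k.toNat 0 (xs.drop (k.toNat - 1))
              = bLoop s k fuel (xs.drop (k.toNat - 1)) := by
            apply ih; simp only [List.length_drop]
            simp only [List.length_cons] at ht; omega
          have hslice1 : PySem.List.slice (x :: xs) none (some k) = x :: xs.take (k.toNat - 1) := by
            rw [PySem.List.slice_to _ hk.le]
            cases hkn' : k.toNat with
            | zero => omega
            | succ m => simp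
          have hslice2 : PySem.List.slice (x :: xs) (some k) none = xs.drop (k.toNat - 1) := by
            rw [PySem.List.slice_from _ hk.le]
            cases hkn' : k.toNat with
            | zero => omega
            | succ m => simp
          have hhead : fAN s k.toNat 0 (x :: xs) = s :: x :: fAN s k.toNat 1 xs := by
            simp [fAN]
          rw [hhead, h1, h0, hih]
          simp [bLoop, hslice1, hslice2]

-- ===== VERDICT (by name: the statement is the Claim_ definition above) =====
theorem insert_sync_frames_spec : Claim_equal_insert_sync_frames := by
  intro frames interval sync_word _
  unfold Spec_insert_sync_frames insert_sync_frames insert_sync_frames_alt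
  by_cases h : interval ≤ 0
  · simp [h]
  · have hk : 0 < interval := by omega
    simp only [if_neg h]
    rw [u16_eq]
    rw [foldA_eq]
    have : (0 : Int) = ((0 : Nat) : Int) := rfl
    rw [this, fA_cast _ _ hk, fAN_eq_bLoop _ _ hk frames.length frames le_rfl]
    simp
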